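-- pv_equiv track=rewrite | github.com/totalcream/BOJ_Python | CTP_BRD/31851.py | is_convex_quad
-- ===== SOURCE A (Python) =====
-- import itertools
--
-- def cross_product(o, a, b):
--     return (a[0] - o[0]) * (b[1] - o[1]) - (a[1] - o[1]) * (b[0] - o[0])
--
-- def is_convex_quad(p1, p2, p3, p4):
--     # Check all permutations to ensure convexity
--     points = [p1, p2, p3, p4]
--     for order in itertools.permutations(points):
--         cross_products = [
--             cross_product(order[0], order[1], order[2]),
--             cross_product(order[1], order[2], order[3]),
--             cross_product(order[2], order[3], order[0]),
--             cross_product(order[3], order[0], order[1])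
--         ]
--         if all(cp > 0 for cp in cross_products) or all(cp < 0 for cp in cross_products):
--             return True
--     return False
-- ===== SOURCE B (Python) =====
-- def cross_product(o, a, b):
--     return (a[0] - o[0]) * (b[1] - o[1]) - (a[1] - o[1]) * (b[0] - o[0])
--
-- def is_convex_quad(p1, p2, p3, p4):
--     # Convex position test: every point must lie strictly outside the
--     # (closed, possibly degenerate) triangle formed by the other three.
--     points = [p1, p2, p3, p4]
--     for i in range(4):
--         o = points[i]
--         a, b, c = [points[j] for j in range(4) if j != i]
--         d1 = cross_product(a, b, o)
--         d2 = cross_product(b, c, o)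
--         d3 = cross_product(c, a, o)
--         strictly_outside = (d1 > 0 or d2 > 0 or d3 > 0) and (d1 < 0 or d2 < 0 or d3 < 0)
--         if not strictly_outside:
--             return False
--     return True
-- ===== Notes on version B (the rewrite author's own statement) =====
-- stated objective: alternative
-- what changed: B replaces A's scan of all 24 vertex orderings (4 cross products each) by a direct convex-position test: each of the four points must lie strictly outside the closed triangle of the other three, judged by three cross-product signs per point.
import Mathlib
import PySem

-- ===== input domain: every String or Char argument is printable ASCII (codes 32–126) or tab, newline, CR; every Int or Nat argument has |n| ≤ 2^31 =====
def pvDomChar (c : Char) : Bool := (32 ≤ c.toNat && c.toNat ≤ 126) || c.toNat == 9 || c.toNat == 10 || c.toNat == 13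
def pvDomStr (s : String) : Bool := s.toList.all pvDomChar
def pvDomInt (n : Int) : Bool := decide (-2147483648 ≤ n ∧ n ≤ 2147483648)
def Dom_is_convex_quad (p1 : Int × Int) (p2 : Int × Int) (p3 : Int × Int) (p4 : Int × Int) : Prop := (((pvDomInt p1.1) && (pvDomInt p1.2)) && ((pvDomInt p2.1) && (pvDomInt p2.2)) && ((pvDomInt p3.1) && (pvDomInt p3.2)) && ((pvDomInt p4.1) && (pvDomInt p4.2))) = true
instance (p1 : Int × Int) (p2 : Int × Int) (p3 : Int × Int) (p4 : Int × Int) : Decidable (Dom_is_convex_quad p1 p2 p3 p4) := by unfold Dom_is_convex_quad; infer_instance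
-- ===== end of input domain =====

-- B replaces A's scan over all 24 vertex orderings by four point-in-triangle
-- sign tests (objective: alternative O(1) formulation of the same decision).

-- ===== PORT A =====
def cross_product (o a b : Int × Int) : Int :=
  (a.1 - o.1) * (b.2 - o.2) - (a.2 - o.2) * (b.1 - o.1)

-- one iteration of A's loop body: the four cross products of an ordering and the
-- all-positive / all-negative test
def pvCheckOrder (a b c d : Int × Int) : Bool :=
  let cps := [cross_product a b c, cross_product b c d, cross_product c d a, cross_product d a b]
  cps.all (fun cp => cp > 0) || cps.all (fun cp => cp < 0)

-- itertools.permutations([p1,p2,p3,p4]) spelled out in itertools' order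
def pvPerms (p1 p2 p3 p4 : Int × Int) :
    List ((Int × Int) × (Int × Int) × (Int × Int) × (Int × Int)) :=
  [(p1, p2, p3, p4), (p1, p2, p4, p3), (p1, p3, p2, p4), (p1, p3, p4, p2),
   (p1, p4, p2, p3), (p1, p4, p3, p2), (p2, p1, p3, p4), (p2, p1, p4, p3),
   (p2, p3, p1, p4), (p2, p3, p4, p1), (p2, p4, p1, p3), (p2, p4, p3, p1),
   (p3, p1, p2, p4), (p3, p1, p4, p2), (p3, p2, p1, p4), (p3, p2, p4, p1),
   (p3, p4, p1, p2), (p3, p4, p2, p1), (p4, p1, p2, p3), (p4, p1, p3, p2),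
   (p4, p2, p1, p3), (p4, p2, p3, p1), (p4, p3, p1, p2), (p4, p3, p2, p1)]

-- loop with early `return True` over the permutations = List.any
def is_convex_quad (p1 : Int × Int) (p2 : Int × Int) (p3 : Int × Int) (p4 : Int × Int) : Bool :=
  (pvPerms p1 p2 p3 p4).any (fun o => pvCheckOrder o.1 o.2.1 o.2.2.1 o.2.2.2)

-- ===== PORT B =====
-- o lies strictly outside the closed (possibly degenerate) triangle a b c
def pvStrictlyOutside (o a b c : Int × Int) : Bool :=
  let d1 := cross_product a b o
  let d2 := cross_product b c o
  let d3 := cross_product c a o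
  (d1 > 0 || d2 > 0 || d3 > 0) && (d1 < 0 || d2 < 0 || d3 < 0)

-- B's loop over the four points (early `return False` = conjunction)
def is_convex_quad_alt (p1 : Int × Int) (p2 : Int × Int) (p3 : Int × Int) (p4 : Int × Int) : Bool :=
  pvStrictlyOutside p1 p2 p3 p4 && pvStrictlyOutside p2 p1 p3 p4 &&
  pvStrictlyOutside p3 p1 p2 p4 && pvStrictlyOutside p4 p1 p2 p3

-- ===== PRECONDITION & SPEC =====
def Spec_is_convex_quad (p1 : Int × Int) (p2 : Int × Int) (p3 : Int × Int) (p4 : Int × Int) (out : Bool) : Prop := out = is_convex_quad_alt p1 p2 p3 p4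
instance (p1 : Int × Int) (p2 : Int × Int) (p3 : Int × Int) (p4 : Int × Int) (out : Bool) : Decidable (Spec_is_convex_quad p1 p2 p3 p4 out) := by unfold Spec_is_convex_quad; infer_instance

-- ===== CLAIM (what is proved, stated in full; the proofs are below) =====
def Claim_equal_is_convex_quad : Prop := ∀ (p1 : Int × Int) (p2 : Int × Int) (p3 : Int × Int) (p4 : Int × Int), Dom_is_convex_quad p1 p2 p3 p4 → Spec_is_convex_quad p1 p2 p3 p4 (is_convex_quad p1 p2 p3 p4)

-- ===== LEMMAS AND PROOFS =====
-- Both programs only compare cross products of triples of the four points with 0.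
-- Each such cross product is ± one of the four "canonical" ones (index-increasing
-- triples) t1..t4; pvA/pvB below are the two programs rewritten in these atoms.
-- Their equality depends only on the SIGNS of t1..t4, so it reduces to 81 sign
-- cases, each decided by kernel evaluation.

-- sign of an integer, kept as a proof-local helper
def pvSgn (t : Int) : Int := if t < 0 then -1 else if t = 0 then 0 else 1

lemma pvSgn_cases (t : Int) : pvSgn t = -1 ∨ pvSgn t = 0 ∨ pvSgn t = 1 := by
  unfold pvSgn; split_ifs <;> simp

lemma pvSgn_gt (t : Int) : (decide (t > 0)) = (decide (pvSgn t > 0)) := by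
  unfold pvSgn; split_ifs <;> rw [decide_eq_decide] <;> omega

lemma pvSgn_neg_gt (t : Int) : (decide (-t > 0)) = (decide (-pvSgn t > 0)) := by
  unfold pvSgn; split_ifs <;> rw [decide_eq_decide] <;> omega

lemma pvSgn_lt (t : Int) : (decide (t < 0)) = (decide (pvSgn t < 0)) := by
  unfold pvSgn; split_ifs <;> rw [decide_eq_decide] <;> omega

lemma pvSgn_neg_lt (t : Int) : (decide (-t < 0)) = (decide (-pvSgn t < 0)) := by
  unfold pvSgn; split_ifs <;> rw [decide_eq_decide] <;> omega

def pvA (t1 t2 t3 t4 : Int) : Bool :=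
  ((decide (t1 > 0) && (decide (t4 > 0) && (decide (t3 > 0) && (decide (t2 > 0) && (true))))) || (decide (t1 < 0) && (decide (t4 < 0) && (decide (t3 < 0) && (decide (t2 < 0) && (true)))))) ||
  (((decide (t2 > 0) && (decide (-t4 > 0) && (decide (-t3 > 0) && (decide (t1 > 0) && (true))))) || (decide (t2 < 0) && (decide (-t4 < 0) && (decide (-t3 < 0) && (decide (t1 < 0) && (true)))))) ||
  (((decide (-t1 > 0) && (decide (-t4 > 0) && (decide (t2 > 0) && (decide (t3 > 0) && (true))))) || (decide (-t1 < 0) && (decide (-t4 < 0) && (decide (t2 < 0) && (decide (t3 < 0) && (true)))))) ||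
  (((decide (t3 > 0) && (decide (t4 > 0) && (decide (-t2 > 0) && (decide (-t1 > 0) && (true))))) || (decide (t3 < 0) && (decide (t4 < 0) && (decide (-t2 < 0) && (decide (-t1 < 0) && (true)))))) ||
  (((decide (-t2 > 0) && (decide (t4 > 0) && (decide (t1 > 0) && (decide (-t3 > 0) && (true))))) || (decide (-t2 < 0) && (decide (t4 < 0) && (decide (t1 < 0) && (decide (-t3 < 0) && (true)))))) ||
  (((decide (-t3 > 0) && (decide (-t4 > 0) && (decide (-t1 > 0) && (decide (-t2 > 0) && (true))))) || (decide (-t3 < 0) && (decide (-t4 < 0) && (decide (-t1 < 0) && (decide (-t2 < 0) && (true)))))) ||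
  (((decide (-t1 > 0) && (decide (t3 > 0) && (decide (t4 > 0) && (decide (-t2 > 0) && (true))))) || (decide (-t1 < 0) && (decide (t3 < 0) && (decide (t4 < 0) && (decide (-t2 < 0) && (true)))))) ||
  (((decide (-t2 > 0) && (decide (-t3 > 0) && (decide (-t4 > 0) && (decide (-t1 > 0) && (true))))) || (decide (-t2 < 0) && (decide (-t3 < 0) && (decide (-t4 < 0) && (decide (-t1 < 0) && (true)))))) ||
  (((decide (t1 > 0) && (decide (-t3 > 0) && (decide (-t2 > 0) && (decide (t4 > 0) && (true))))) || (decide (t1 < 0) && (decide (-t3 < 0) && (decide (-t2 < 0) && (decide (t4 < 0) && (true)))))) ||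
  (((decide (t4 > 0) && (decide (t3 > 0) && (decide (t2 > 0) && (decide (t1 > 0) && (true))))) || (decide (t4 < 0) && (decide (t3 < 0) && (decide (t2 < 0) && (decide (t1 < 0) && (true)))))) ||
  (((decide (t2 > 0) && (decide (t3 > 0) && (decide (-t1 > 0) && (decide (-t4 > 0) && (true))))) || (decide (t2 < 0) && (decide (t3 < 0) && (decide (-t1 < 0) && (decide (-t4 < 0) && (true)))))) ||
  (((decide (-t4 > 0) && (decide (-t3 > 0) && (decide (t1 > 0) && (decide (t2 > 0) && (true))))) || (decide (-t4 < 0) && (decide (-t3 < 0) && (decide (t1 < 0) && (decide (t2 < 0) && (true)))))) ||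
  (((decide (t1 > 0) && (decide (t2 > 0) && (decide (-t4 > 0) && (decide (-t3 > 0) && (true))))) || (decide (t1 < 0) && (decide (t2 < 0) && (decide (-t4 < 0) && (decide (-t3 < 0) && (true)))))) ||
  (((decide (-t3 > 0) && (decide (-t2 > 0) && (decide (t4 > 0) && (decide (t1 > 0) && (true))))) || (decide (-t3 < 0) && (decide (-t2 < 0) && (decide (t4 < 0) && (decide (t1 < 0) && (true)))))) ||
  (((decide (-t1 > 0) && (decide (-t2 > 0) && (decide (-t3 > 0) && (decide (-t4 > 0) && (true))))) || (decide (-t1 < 0) && (decide (-t2 < 0) && (decide (-t3 < 0) && (decide (-t4 < 0) && (true)))))) ||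
  (((decide (-t4 > 0) && (decide (t2 > 0) && (decide (t3 > 0) && (decide (-t1 > 0) && (true))))) || (decide (-t4 < 0) && (decide (t2 < 0) && (decide (t3 < 0) && (decide (-t1 < 0) && (true)))))) ||
  (((decide (t3 > 0) && (decide (t2 > 0) && (decide (t1 > 0) && (decide (t4 > 0) && (true))))) || (decide (t3 < 0) && (decide (t2 < 0) && (decide (t1 < 0) && (decide (t4 < 0) && (true)))))) ||
  (((decide (t4 > 0) && (decide (-t2 > 0) && (decide (-t1 > 0) && (decide (t3 > 0) && (true))))) || (decide (t4 < 0) && (decide (-t2 < 0) && (decide (-t1 < 0) && (decide (t3 < 0) && (true)))))) ||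
  (((decide (t2 > 0) && (decide (t1 > 0) && (decide (t4 > 0) && (decide (t3 > 0) && (true))))) || (decide (t2 < 0) && (decide (t1 < 0) && (decide (t4 < 0) && (decide (t3 < 0) && (true)))))) ||
  (((decide (t3 > 0) && (decide (-t1 > 0) && (decide (-t4 > 0) && (decide (t2 > 0) && (true))))) || (decide (t3 < 0) && (decide (-t1 < 0) && (decide (-t4 < 0) && (decide (t2 < 0) && (true)))))) ||
  (((decide (-t2 > 0) && (decide (-t1 > 0) && (decide (t3 > 0) && (decide (t4 > 0) && (true))))) || (decide (-t2 < 0) && (decide (-t1 < 0) && (decide (t3 < 0) && (decide (t4 < 0) && (true)))))) ||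
  (((decide (t4 > 0) && (decide (t1 > 0) && (decide (-t3 > 0) && (decide (-t2 > 0) && (true))))) || (decide (t4 < 0) && (decide (t1 < 0) && (decide (-t3 < 0) && (decide (-t2 < 0) && (true)))))) ||
  (((decide (-t3 > 0) && (decide (t1 > 0) && (decide (t2 > 0) && (decide (-t4 > 0) && (true))))) || (decide (-t3 < 0) && (decide (t1 < 0) && (decide (t2 < 0) && (decide (-t4 < 0) && (true)))))) ||
  (((decide (-t4 > 0) && (decide (-t1 > 0) && (decide (-t2 > 0) && (decide (-t3 > 0) && (true))))) || (decide (-t4 < 0) && (decide (-t1 < 0) && (decide (-t2 < 0) && (decide (-t3 < 0) && (true)))))) ||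
  (false))))))))))))))))))))))))

def pvB (t1 t2 t3 t4 : Int) : Bool :=
  ((decide (t1 > 0) || decide (t3 > 0) || decide (-t2 > 0)) && (decide (t1 < 0) || decide (t3 < 0) || decide (-t2 < 0))) &&
  ((decide (-t1 > 0) || decide (t4 > 0) || decide (t2 > 0)) && (decide (-t1 < 0) || decide (t4 < 0) || decide (t2 < 0))) &&
  ((decide (t1 > 0) || decide (-t4 > 0) || decide (t3 > 0)) && (decide (t1 < 0) || decide (-t4 < 0) || decide (t3 < 0))) &&
  ((decide (t2 > 0) || decide (t4 > 0) || decide (-t3 > 0)) && (decide (t2 < 0) || decide (t4 < 0) || decide (-t3 < 0)))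

lemma pvSgn_mem (t : Int) : pvSgn t ∈ ([-1, 0, 1] : List Int) := by
  rcases pvSgn_cases t with h | h | h <;> simp [h]

lemma pv_key81 : ∀ s1 ∈ ([-1, 0, 1] : List Int), ∀ s2 ∈ ([-1, 0, 1] : List Int),
    ∀ s3 ∈ ([-1, 0, 1] : List Int), ∀ s4 ∈ ([-1, 0, 1] : List Int),
    pvA s1 s2 s3 s4 = pvB s1 s2 s3 s4 := by decide

lemma pv_key (t1 t2 t3 t4 : Int) : pvA t1 t2 t3 t4 = pvB t1 t2 t3 t4 := by
  have g1 := pvSgn_gt t1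
  have gn1 := pvSgn_neg_gt t1
  have l1 := pvSgn_lt t1
  have ln1 := pvSgn_neg_lt t1
  have g2 := pvSgn_gt t2
  have gn2 := pvSgn_neg_gt t2
  have l2 := pvSgn_lt t2
  have ln2 := pvSgn_neg_lt t2
  have g3 := pvSgn_gt t3
  have gn3 := pvSgn_neg_gt t3
  have l3 := pvSgn_lt t3
  have ln3 := pvSgn_neg_lt t3
  have g4 := pvSgn_gt t4
  have gn4 := pvSgn_neg_gt t4
  have l4 := pvSgn_lt t4
  have ln4 := pvSgn_neg_lt t4
  calc pvA t1 t2 t3 t4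
      = pvA (pvSgn t1) (pvSgn t2) (pvSgn t3) (pvSgn t4) := by
        simp only [pvA, g1, gn1, l1, ln1, g2, gn2, l2, ln2, g3, gn3, l3, ln3, g4, gn4, l4, ln4]
    _ = pvB (pvSgn t1) (pvSgn t2) (pvSgn t3) (pvSgn t4) :=
        pv_key81 _ (pvSgn_mem t1) _ (pvSgn_mem t2) _ (pvSgn_mem t3) _ (pvSgn_mem t4)
    _ = pvB t1 t2 t3 t4 := by
        simp only [pvB, g1, gn1, l1, ln1, g2, gn2, l2, ln2, g3, gn3, l3, ln3, g4, gn4, l4, ln4]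

lemma is_convex_quad_eq_alt (p1 p2 p3 p4 : Int × Int) :
    is_convex_quad p1 p2 p3 p4 = is_convex_quad_alt p1 p2 p3 p4 := by
  have h132 : cross_product p1 p3 p2 = -(cross_product p1 p2 p3) := by simp only [cross_product]; ring
  have h142 : cross_product p1 p4 p2 = -(cross_product p1 p2 p4) := by simp only [cross_product]; ring
  have h143 : cross_product p1 p4 p3 = -(cross_product p1 p3 p4) := by simp only [cross_product]; ring
  have h213 : cross_product p2 p1 p3 = -(cross_product p1 p2 p3) := by simp only [cross_product]; ring
  have h214 : cross_product p2 p1 p4 = -(cross_product p1 p2 p4) := by simp only [cross_product]; ring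
  have h231 : cross_product p2 p3 p1 = cross_product p1 p2 p3 := by simp only [cross_product]; ring
  have h241 : cross_product p2 p4 p1 = cross_product p1 p2 p4 := by simp only [cross_product]; ring
  have h243 : cross_product p2 p4 p3 = -(cross_product p2 p3 p4) := by simp only [cross_product]; ring
  have h312 : cross_product p3 p1 p2 = cross_product p1 p2 p3 := by simp only [cross_product]; ring
  have h314 : cross_product p3 p1 p4 = -(cross_product p1 p3 p4) := by simp only [cross_product]; ring
  have h321 : cross_product p3 p2 p1 = -(cross_product p1 p2 p3) := by simp only [cross_product]; ring
  have h324 : cross_product p3 p2 p4 = -(cross_product p2 p3 p4) := by simp only [cross_product]; ring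
  have h341 : cross_product p3 p4 p1 = cross_product p1 p3 p4 := by simp only [cross_product]; ring
  have h342 : cross_product p3 p4 p2 = cross_product p2 p3 p4 := by simp only [cross_product]; ring
  have h412 : cross_product p4 p1 p2 = cross_product p1 p2 p4 := by simp only [cross_product]; ring
  have h413 : cross_product p4 p1 p3 = cross_product p1 p3 p4 := by simp only [cross_product]; ring
  have h421 : cross_product p4 p2 p1 = -(cross_product p1 p2 p4) := by simp only [cross_product]; ring
  have h423 : cross_product p4 p2 p3 = cross_product p2 p3 p4 := by simp only [cross_product]; ring
  have h431 : cross_product p4 p3 p1 = -(cross_product p1 p3 p4) := by simp only [cross_product]; ring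
  have h432 : cross_product p4 p3 p2 = -(cross_product p2 p3 p4) := by simp only [cross_product]; ring
  calc is_convex_quad p1 p2 p3 p4
      = pvA (cross_product p1 p2 p3) (cross_product p1 p2 p4)
          (cross_product p1 p3 p4) (cross_product p2 p3 p4) := by
        simp only [is_convex_quad, pvPerms, pvCheckOrder, pvA,
          List.any_cons, List.any_nil, List.all_cons, List.all_nil, h132, h142, h143, h213, h214, h231, h241, h243, h312, h314, h321, h324, h341, h342, h412, h413, h421, h423, h431, h432]
    _ = pvB (cross_product p1 p2 p3) (cross_product p1 p2 p4)
          (cross_product p1 p3 p4) (cross_product p2 p3 p4) := pv_key _ _ _ _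
    _ = is_convex_quad_alt p1 p2 p3 p4 := by
        simp only [is_convex_quad_alt, pvStrictlyOutside, pvB, h132, h142, h143, h213, h214, h231, h241, h243, h312, h314, h321, h324, h341, h342, h412, h413, h421, h423, h431, h432]

-- ===== VERDICT (by name: the statement is the Claim_ definition above) =====
theorem is_convex_quad_spec : Claim_equal_is_convex_quad := by
  intro p1 p2 p3 p4 _
  unfold Spec_is_convex_quad
  exact is_convex_quad_eq_alt p1 p2 p3 p4
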